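-- pv_equiv track=rewrite | github.com/torres98/BLEP | util_test.py | wordlist_to_int_v2
-- ===== SOURCE A (Python) =====
-- def wordlist_to_int_v2(wordlist, word_size, endianess = 'big'):
--     value = 0
--
--     if endianess == 'little':
--         for i in range(len(wordlist)):
--             value |= wordlist[i] << (word_size * i)
--     else:
--         for i in range(len(wordlist)):
--             value |= wordlist[i] << (word_size * (len(wordlist) - i - 1))
--
--     return value
-- ===== SOURCE B (Python) =====
-- def wordlist_to_int_v2(wordlist, word_size, endianess = 'big'):
--     words = wordlist if endianess == 'little' else wordlist[::-1]
--
--     def comb(lst):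
--         n = len(lst)
--         if n == 0:
--             return 0
--         if n == 1:
--             return lst[0]
--         k = n // 2
--         return comb(lst[:k]) | (comb(lst[k:]) << (word_size * k))
--
--     return comb(words)
-- ===== Notes on version B (the rewrite author's own statement) =====
-- stated objective: faster
-- what changed: Replaced the index loop that ORs each word into one ever-growing accumulator with a divide-and-conquer combine of halves (big-endian handled by reversing once), so big-integer shifts/ORs act on balanced halves instead of the whole prefix.
import Mathlib
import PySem

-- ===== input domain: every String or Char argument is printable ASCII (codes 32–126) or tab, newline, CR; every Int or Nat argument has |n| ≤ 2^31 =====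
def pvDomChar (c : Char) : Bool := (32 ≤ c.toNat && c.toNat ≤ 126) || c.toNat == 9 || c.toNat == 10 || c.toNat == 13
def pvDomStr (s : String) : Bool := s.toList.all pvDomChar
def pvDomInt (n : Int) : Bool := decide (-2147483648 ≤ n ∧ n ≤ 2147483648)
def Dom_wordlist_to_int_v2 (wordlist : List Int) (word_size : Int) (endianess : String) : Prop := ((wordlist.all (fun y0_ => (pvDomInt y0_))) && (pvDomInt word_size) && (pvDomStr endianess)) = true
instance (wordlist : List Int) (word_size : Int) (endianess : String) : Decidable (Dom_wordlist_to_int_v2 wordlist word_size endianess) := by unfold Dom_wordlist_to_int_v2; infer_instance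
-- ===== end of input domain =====

-- B replaces A's index loop (which ORs every word into one ever-growing accumulator) by a
-- divide-and-conquer combine of halves, reversing the list once for big-endian; faster on long lists.

-- ===== PORT A =====
-- Python: value |= wordlist[i] << (word_size * i)  (little) or << (word_size * (len-i-1)) (big).
-- Indexing wordlist[i] is in range for i ∈ range(len), so List.getD is exact; Python raises
-- ValueError on a negative shift amount, so `.toNat` is only reached with a nonneg argument inside Pre_.
def wordlist_to_int_v2 (wordlist : List Int) (word_size : Int) (endianess : String) : Int :=
  let value : Int := 0
  if endianess == "little" then
    (List.range wordlist.length).foldl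
      (fun v i => PySem.Int.bor v ((wordlist.getD i 0) <<< (word_size * (i : Int)).toNat)) value
  else
    (List.range wordlist.length).foldl
      (fun v i => PySem.Int.bor v
        ((wordlist.getD i 0) <<< (word_size * ((wordlist.length : Int) - (i : Int) - 1)).toNat)) value

-- ===== PORT B =====
-- comb(lst): n==0 → 0, n==1 → lst[0], else split at k = n//2 and OR the shifted halves.
def pvComb (word_size : Int) (l : List Int) : Int :=
  if l.length = 0 then 0
  else if l.length = 1 then l.headD 0
  else
    let k := l.length / 2
    PySem.Int.bor (pvComb word_size (l.take k))
      (pvComb word_size (l.drop k) <<< (word_size * (k : Int)).toNat)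
termination_by l.length
decreasing_by
  · simp only [List.length_take]; omega
  · simp only [List.length_drop]; omega

def wordlist_to_int_v2_alt (wordlist : List Int) (word_size : Int) (endianess : String) : Int :=
  let words := if endianess == "little" then wordlist else wordlist.reverse  -- wordlist[::-1]
  pvComb word_size words

-- ===== PRECONDITION & SPEC =====
-- Pre_ excludes exactly the inputs where Python A raises ValueError ("negative shift count"):
-- a negative word_size together with at least two words.
def Pre_wordlist_to_int_v2 (wordlist : List Int) (word_size : Int) (endianess : String) : Prop :=
  0 ≤ word_size ∨ wordlist.length ≤ 1
instance (wordlist : List Int) (word_size : Int) (endianess : String) : Decidable (Pre_wordlist_to_int_v2 wordlist word_size endianess) := by unfold Pre_wordlist_to_int_v2; infer_instance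

def pvWitness_wordlist_to_int_v2 : List Int × Int × String := ([1, 2, 3], 8, "big")

def Spec_wordlist_to_int_v2 (wordlist : List Int) (word_size : Int) (endianess : String) (out : Int) : Prop := out = wordlist_to_int_v2_alt wordlist word_size endianess
instance (wordlist : List Int) (word_size : Int) (endianess : String) (out : Int) : Decidable (Spec_wordlist_to_int_v2 wordlist word_size endianess out) := by unfold Spec_wordlist_to_int_v2; infer_instance

-- ===== CLAIM (what is proved, stated in full; the proofs are below) =====
def Claim_equal_wordlist_to_int_v2 : Prop := ∀ (wordlist : List Int) (word_size : Int) (endianess : String), Dom_wordlist_to_int_v2 wordlist word_size endianess → Pre_wordlist_to_int_v2 wordlist word_size endianess → Spec_wordlist_to_int_v2 wordlist word_size endianess (wordlist_to_int_v2 wordlist word_size endianess)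

-- ===== LEMMAS AND PROOFS =====

-- Nat-level bit identities (low bit 0/1 against low bit 0/1), by testBit extensionality.
theorem pvNatAnd00 (x y : Nat) : (2*x) &&& (2*y) = 2*(x &&& y) := by
  apply Nat.eq_of_testBit_eq; intro i
  rw [Nat.testBit_and]
  cases i with
  | zero =>
      simp only [Nat.testBit_zero]
      rw [show (2*x) % 2 = 0 by omega,
        show (2*y) % 2 = 0 by omega,
        show (2*(x &&& y)) % 2 = 0 by omega]
      simp
  | succ i =>
      simp only [Nat.testBit_add_one]
      rw [show (2*x) / 2 = x by omega, show (2*y) / 2 = y by omega,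
        show (2*(x &&& y)) / 2 = x &&& y by omega, Nat.testBit_and]

theorem pvNatAnd10 (x y : Nat) : (2*x+1) &&& (2*y) = 2*(x &&& y) := by
  apply Nat.eq_of_testBit_eq; intro i
  rw [Nat.testBit_and]
  cases i with
  | zero =>
      simp only [Nat.testBit_zero]
      rw [show (2*x+1) % 2 = 1 by omega,
        show (2*y) % 2 = 0 by omega,
        show (2*(x &&& y)) % 2 = 0 by omega]
      simp
  | succ i =>
      simp only [Nat.testBit_add_one]
      rw [show (2*x+1) / 2 = x by omega, show (2*y) / 2 = y by omega,
        show (2*(x &&& y)) / 2 = x &&& y by omega, Nat.testBit_and]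

theorem pvNatAnd11 (x y : Nat) : (2*x+1) &&& (2*y+1) = 2*(x &&& y)+1 := by
  apply Nat.eq_of_testBit_eq; intro i
  rw [Nat.testBit_and]
  cases i with
  | zero =>
      simp only [Nat.testBit_zero]
      rw [show (2*x+1) % 2 = 1 by omega,
        show (2*y+1) % 2 = 1 by omega,
        show (2*(x &&& y)+1) % 2 = 1 by omega]
      simp
  | succ i =>
      simp only [Nat.testBit_add_one]
      rw [show (2*x+1) / 2 = x by omega, show (2*y+1) / 2 = y by omega,
        show (2*(x &&& y)+1) / 2 = x &&& y by omega, Nat.testBit_and]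

theorem pvNatOr00 (x y : Nat) : (2*x) ||| (2*y) = 2*(x ||| y) := by
  apply Nat.eq_of_testBit_eq; intro i
  rw [Nat.testBit_or]
  cases i with
  | zero =>
      simp only [Nat.testBit_zero]
      rw [show (2*x) % 2 = 0 by omega,
        show (2*y) % 2 = 0 by omega,
        show (2*(x ||| y)) % 2 = 0 by omega]
      simp
  | succ i =>
      simp only [Nat.testBit_add_one]
      rw [show (2*x) / 2 = x by omega, show (2*y) / 2 = y by omega,
        show (2*(x ||| y)) / 2 = x ||| y by omega, Nat.testBit_or]

theorem pvNatOr10 (x y : Nat) : (2*x+1) ||| (2*y) = 2*(x ||| y)+1 := by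
  apply Nat.eq_of_testBit_eq; intro i
  rw [Nat.testBit_or]
  cases i with
  | zero =>
      simp only [Nat.testBit_zero]
      rw [show (2*x+1) % 2 = 1 by omega,
        show (2*y) % 2 = 0 by omega,
        show (2*(x ||| y)+1) % 2 = 1 by omega]
      simp
  | succ i =>
      simp only [Nat.testBit_add_one]
      rw [show (2*x+1) / 2 = x by omega, show (2*y) / 2 = y by omega,
        show (2*(x ||| y)+1) / 2 = x ||| y by omega, Nat.testBit_or]

theorem pvNatOr11 (x y : Nat) : (2*x+1) ||| (2*y+1) = 2*(x ||| y)+1 := by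
  apply Nat.eq_of_testBit_eq; intro i
  rw [Nat.testBit_or]
  cases i with
  | zero =>
      simp only [Nat.testBit_zero]
      rw [show (2*x+1) % 2 = 1 by omega,
        show (2*y+1) % 2 = 1 by omega,
        show (2*(x ||| y)+1) % 2 = 1 by omega]
      simp
  | succ i =>
      simp only [Nat.testBit_add_one]
      rw [show (2*x+1) / 2 = x by omega, show (2*y+1) / 2 = y by omega,
        show (2*(x ||| y)+1) / 2 = x ||| y by omega, Nat.testBit_or]

theorem pvNatAnd01 (x y : Nat) : (2*x) &&& (2*y+1) = 2*(x &&& y) := by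
  rw [Nat.land_comm, pvNatAnd10, Nat.land_comm]

-- "doubling" recursion of PySem.Int.bor
theorem pvBorDbl00pn (a b : Int) (ha : 0 ≤ a) (hb : ¬ 0 ≤ b) :
    PySem.Int.bor (2*a) (2*b) = 2 * PySem.Int.bor a b := by
  have h1 : ¬ (0 ≤ b) := by omega
  have h2 : ¬ (0 ≤ 2*b) := by omega
  have h3 : (0 : Int) ≤ 2*a := by omega
  simp only [PySem.Int.bor, if_pos ha, if_pos h3, if_neg h1, if_neg h2]
  rw [show (-(2*b) - 1).toNat = 2*(-b-1).toNat + 1 by omega,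
    show (2*a).toNat = 2*a.toNat by omega, pvNatAnd10]
  have hle : (-b-1).toNat &&& a.toNat ≤ (-b-1).toNat := Nat.and_le_left
  rw [show 2*(-b-1).toNat + 1 - 2*((-b-1).toNat &&& a.toNat)
      = 2*((-b-1).toNat - ((-b-1).toNat &&& a.toNat)) + 1 by omega]
  push_cast; ring

theorem pvBorDbl00 (a b : Int) : PySem.Int.bor (2*a) (2*b) = 2 * PySem.Int.bor a b := by
  by_cases ha : 0 ≤ a <;> by_cases hb : 0 ≤ b
  · have h3 : (0 : Int) ≤ 2*a := by omega
    have h4 : (0 : Int) ≤ 2*b := by omega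
    simp only [PySem.Int.bor, if_pos ha, if_pos hb, if_pos h3, if_pos h4]
    rw [show (2*a).toNat = 2*a.toNat by omega, show (2*b).toNat = 2*b.toNat by omega, pvNatOr00]
    push_cast; ring
  · exact pvBorDbl00pn a b ha hb
  · rw [PySem.Int.bor_comm, PySem.Int.bor_comm a b]; exact pvBorDbl00pn b a hb ha
  · have h1 : ¬ (0 ≤ a) := by omega
    have h2 : ¬ (0 ≤ b) := by omega
    have h3 : ¬ (0 ≤ 2*a) := by omega
    have h4 : ¬ (0 ≤ 2*b) := by omega
    simp only [PySem.Int.bor, if_neg h1, if_neg h2, if_neg h3, if_neg h4]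
    rw [show (-(2*a) - 1).toNat = 2*(-a-1).toNat + 1 by omega,
      show (-(2*b) - 1).toNat = 2*(-b-1).toNat + 1 by omega, pvNatAnd11]
    push_cast; ring

theorem pvBorDbl10 (a b : Int) : PySem.Int.bor (2*a+1) (2*b) = 2 * PySem.Int.bor a b + 1 := by
  by_cases ha : 0 ≤ a <;> by_cases hb : 0 ≤ b
  · have h3 : (0 : Int) ≤ 2*a+1 := by omega
    have h4 : (0 : Int) ≤ 2*b := by omega
    simp only [PySem.Int.bor, if_pos ha, if_pos hb, if_pos h3, if_pos h4]
    rw [show (2*a+1).toNat = 2*a.toNat+1 by omega, show (2*b).toNat = 2*b.toNat by omega, pvNatOr10]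
    push_cast; ring
  · have h1 : ¬ (0 ≤ b) := by omega
    have h3 : (0 : Int) ≤ 2*a+1 := by omega
    have h4 : ¬ (0 ≤ 2*b) := by omega
    simp only [PySem.Int.bor, if_pos ha, if_pos h3, if_neg h1, if_neg h4]
    rw [show (-(2*b) - 1).toNat = 2*(-b-1).toNat + 1 by omega,
      show (2*a+1).toNat = 2*a.toNat+1 by omega, pvNatAnd11]
    have hle : (-b-1).toNat &&& a.toNat ≤ (-b-1).toNat := Nat.and_le_left
    rw [show 2*(-b-1).toNat + 1 - (2*((-b-1).toNat &&& a.toNat) + 1)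
        = 2*((-b-1).toNat - ((-b-1).toNat &&& a.toNat)) by omega]
    push_cast; ring
  · have h1 : ¬ (0 ≤ a) := by omega
    have h3 : ¬ (0 ≤ 2*a+1) := by omega
    have h4 : (0 : Int) ≤ 2*b := by omega
    simp only [PySem.Int.bor, if_neg h1, if_pos hb, if_neg h3, if_pos h4]
    rw [show (-(2*a+1) - 1).toNat = 2*(-a-1).toNat by omega,
      show (2*b).toNat = 2*b.toNat by omega, pvNatAnd00]
    have hle : (-a-1).toNat &&& b.toNat ≤ (-a-1).toNat := Nat.and_le_left
    rw [show 2*(-a-1).toNat - 2*((-a-1).toNat &&& b.toNat)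
        = 2*((-a-1).toNat - ((-a-1).toNat &&& b.toNat)) by omega]
    push_cast; ring
  · have h1 : ¬ (0 ≤ a) := by omega
    have h2 : ¬ (0 ≤ b) := by omega
    have h3 : ¬ (0 ≤ 2*a+1) := by omega
    have h4 : ¬ (0 ≤ 2*b) := by omega
    simp only [PySem.Int.bor, if_neg h1, if_neg h2, if_neg h3, if_neg h4]
    rw [show (-(2*a+1) - 1).toNat = 2*(-a-1).toNat by omega,
      show (-(2*b) - 1).toNat = 2*(-b-1).toNat + 1 by omega]
    rw [Nat.land_comm, pvNatAnd10, Nat.land_comm]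
    push_cast; ring

theorem pvBorDbl01 (a b : Int) : PySem.Int.bor (2*a) (2*b+1) = 2 * PySem.Int.bor a b + 1 := by
  rw [PySem.Int.bor_comm, PySem.Int.bor_comm a b]; exact pvBorDbl10 b a

theorem pvBorDbl11 (a b : Int) : PySem.Int.bor (2*a+1) (2*b+1) = 2 * PySem.Int.bor a b + 1 := by
  by_cases ha : 0 ≤ a <;> by_cases hb : 0 ≤ b
  · have h3 : (0 : Int) ≤ 2*a+1 := by omega
    have h4 : (0 : Int) ≤ 2*b+1 := by omega
    simp only [PySem.Int.bor, if_pos ha, if_pos hb, if_pos h3, if_pos h4]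
    rw [show (2*a+1).toNat = 2*a.toNat+1 by omega, show (2*b+1).toNat = 2*b.toNat+1 by omega,
      pvNatOr11]
    push_cast; ring
  · have h1 : ¬ (0 ≤ b) := by omega
    have h3 : (0 : Int) ≤ 2*a+1 := by omega
    have h4 : ¬ (0 ≤ 2*b+1) := by omega
    simp only [PySem.Int.bor, if_pos ha, if_neg h1, if_pos h3, if_neg h4]
    rw [show (-(2*b+1) - 1).toNat = 2*(-b-1).toNat by omega,
      show (2*a+1).toNat = 2*a.toNat+1 by omega, pvNatAnd01]
    have hle : (-b-1).toNat &&& a.toNat ≤ (-b-1).toNat := Nat.and_le_left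
    rw [show 2*(-b-1).toNat - 2*((-b-1).toNat &&& a.toNat)
        = 2*((-b-1).toNat - ((-b-1).toNat &&& a.toNat)) by omega]
    push_cast; ring
  · rw [PySem.Int.bor_comm, PySem.Int.bor_comm a b]
    have h1 : ¬ (0 ≤ a) := by omega
    have h3 : ¬ (0 ≤ 2*a+1) := by omega
    have h4 : (0 : Int) ≤ 2*b+1 := by omega
    simp only [PySem.Int.bor, if_neg h1, if_pos hb, if_neg h3, if_pos h4]
    rw [show (-(2*a+1) - 1).toNat = 2*(-a-1).toNat by omega,
      show (2*b+1).toNat = 2*b.toNat+1 by omega, pvNatAnd01]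
    have hle : (-a-1).toNat &&& b.toNat ≤ (-a-1).toNat := Nat.and_le_left
    rw [show 2*(-a-1).toNat - 2*((-a-1).toNat &&& b.toNat)
        = 2*((-a-1).toNat - ((-a-1).toNat &&& b.toNat)) by omega]
    push_cast; ring
  · have h1 : ¬ (0 ≤ a) := by omega
    have h2 : ¬ (0 ≤ b) := by omega
    have h3 : ¬ (0 ≤ 2*a+1) := by omega
    have h4 : ¬ (0 ≤ 2*b+1) := by omega
    simp only [PySem.Int.bor, if_neg h1, if_neg h2, if_neg h3, if_neg h4]
    rw [show (-(2*a+1) - 1).toNat = 2*(-a-1).toNat by omega,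
      show (-(2*b+1) - 1).toNat = 2*(-b-1).toNat by omega, pvNatAnd00]
    push_cast; ring

theorem pvBorZeroLeft (a : Int) : PySem.Int.bor 0 a = a := by
  rw [PySem.Int.bor_comm]; exact PySem.Int.bor_zero a

theorem pvBorNegOneLeft (a : Int) : PySem.Int.bor (-1) a = -1 := by
  have h1 : ¬ (0 ≤ (-1 : Int)) := by omega
  by_cases ha : 0 ≤ a
  · simp only [PySem.Int.bor, if_neg h1, if_pos ha]
    norm_num
  · have h2 : ¬ (0 ≤ a) := by omega
    simp only [PySem.Int.bor, if_neg h1, if_neg h2]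
    norm_num

theorem pvBorAssocAux : ∀ (k : Nat) (a b c : Int), a.natAbs + b.natAbs + c.natAbs ≤ k →
    PySem.Int.bor (PySem.Int.bor a b) c = PySem.Int.bor a (PySem.Int.bor b c) := by
  intro k
  induction k with
  | zero =>
      intro a b c h
      have : a = 0 ∧ b = 0 ∧ c = 0 := by omega
      obtain ⟨rfl, rfl, rfl⟩ := this
      simp [PySem.Int.bor_zero]
  | succ k ih =>
      intro a b c h
      by_cases ha0 : a = 0
      · subst ha0; rw [pvBorZeroLeft, pvBorZeroLeft]
      by_cases ha1 : a = -1
      · subst ha1; rw [pvBorNegOneLeft, pvBorNegOneLeft, pvBorNegOneLeft]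
      by_cases hb0 : b = 0
      · subst hb0; rw [PySem.Int.bor_zero, pvBorZeroLeft]
      by_cases hb1 : b = -1
      · subst hb1
        rw [pvBorNegOneLeft, PySem.Int.bor_comm a (-1), pvBorNegOneLeft, pvBorNegOneLeft]
      by_cases hc0 : c = 0
      · subst hc0; rw [PySem.Int.bor_zero, PySem.Int.bor_zero]
      by_cases hc1 : c = -1
      · subst hc1; rw [PySem.Int.bor_comm _ (-1), pvBorNegOneLeft, PySem.Int.bor_comm b (-1),
          pvBorNegOneLeft, PySem.Int.bor_comm a (-1), pvBorNegOneLeft]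
      obtain ⟨a', ra, hra, haeq, halt⟩ :
          ∃ q r : Int, (r = 0 ∨ r = 1) ∧ a = 2*q + r ∧ q.natAbs < a.natAbs := by
        exact ⟨a / 2, a % 2, by omega, by omega, by omega⟩
      obtain ⟨b', rb, hrb, hbeq, hblt⟩ :
          ∃ q r : Int, (r = 0 ∨ r = 1) ∧ b = 2*q + r ∧ q.natAbs < b.natAbs := by
        exact ⟨b / 2, b % 2, by omega, by omega, by omega⟩
      obtain ⟨c', rc, hrc, hceq, hclt⟩ :
          ∃ q r : Int, (r = 0 ∨ r = 1) ∧ c = 2*q + r ∧ q.natAbs < c.natAbs := by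
        exact ⟨c / 2, c % 2, by omega, by omega, by omega⟩
      have ihabc : PySem.Int.bor (PySem.Int.bor a' b') c' =
          PySem.Int.bor a' (PySem.Int.bor b' c') := by
        apply ih; omega
      subst haeq hbeq hceq
      rcases hra with rfl | rfl <;> rcases hrb with rfl | rfl <;> rcases hrc with rfl | rfl <;>
        simp only [add_zero, pvBorDbl00, pvBorDbl10, pvBorDbl01, pvBorDbl11, ihabc]

theorem pvBorAssoc (a b c : Int) :
    PySem.Int.bor (PySem.Int.bor a b) c = PySem.Int.bor a (PySem.Int.bor b c) :=
  pvBorAssocAux (a.natAbs + b.natAbs + c.natAbs) a b c le_rfl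

theorem pvBorShl (a b : Int) (n : Nat) :
    (PySem.Int.bor a b) <<< n = PySem.Int.bor (a <<< n) (b <<< n) := by
  induction n with
  | zero => simp [Int.shiftLeft_zero]
  | succ n ih =>
      simp only [Int.shiftLeft_eq] at *
      rw [pow_succ, show a * (2^n * 2) = 2 * (a * 2^n) by ring,
        show b * (2^n * 2) = 2 * (b * 2^n) by ring, pvBorDbl00, ← ih]
      ring

theorem pvShlShl (a : Int) (m n : Nat) : (a <<< m) <<< n = a <<< (m + n) := by
  simp only [Int.shiftLeft_eq]
  rw [pow_add]; ring

-- little-endian Horner value: L N [w0, w1, …] = w0 | ((w1 | (… << N)) << N)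
def pvL (N : Nat) : List Int → Int
  | [] => 0
  | w :: t => PySem.Int.bor w (pvL N t <<< N)

theorem pvL_append (N : Nat) (l1 l2 : List Int) :
    pvL N (l1 ++ l2) = PySem.Int.bor (pvL N l1) (pvL N l2 <<< (N * l1.length)) := by
  induction l1 with
  | nil => simp [pvL, pvBorZeroLeft, Int.shiftLeft_zero]
  | cons w t ih =>
      simp only [List.cons_append, pvL, ih, pvBorShl, pvShlShl, List.length_cons]
      rw [pvBorAssoc, show N * t.length + N = N * (t.length + 1) by ring]

theorem pvL_snoc (N : Nat) (l : List Int) (w : Int) :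
    pvL N (l ++ [w]) = PySem.Int.bor (pvL N l) (w <<< (N * l.length)) := by
  rw [pvL_append]
  simp [pvL, Int.zero_shiftLeft, PySem.Int.bor_zero]

-- seed extraction for OR-folds
theorem pvFoldSeed (g : Nat → Int) : ∀ (r : List Nat) (v : Int),
    r.foldl (fun acc i => PySem.Int.bor acc (g i)) v =
      PySem.Int.bor v (r.foldl (fun acc i => PySem.Int.bor acc (g i)) 0) := by
  intro r
  induction r with
  | nil => intro v; simp [PySem.Int.bor_zero]
  | cons i t ih =>
      intro v
      simp only [List.foldl_cons]
      rw [ih (PySem.Int.bor v (g i)), ih (PySem.Int.bor 0 (g i)), pvBorZeroLeft, pvBorAssoc]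

-- A's little-endian loop computes pvL
theorem pvAL (N : Nat) : ∀ (l : List Int),
    (List.range l.length).foldl (fun v i => PySem.Int.bor v (l.getD i 0 <<< (N * i))) 0 =
      pvL N l := by
  intro l
  induction l using List.reverseRecOn with
  | nil => simp [pvL]
  | append_singleton t w ih =>
      rw [List.length_append, List.length_cons, List.length_nil, List.range_succ,
        List.foldl_append]
      have hcong : (List.range t.length).foldl
          (fun v i => PySem.Int.bor v ((t ++ [w]).getD i 0 <<< (N * i))) 0 =
          (List.range t.length).foldl (fun v i => PySem.Int.bor v (t.getD i 0 <<< (N * i))) 0 := by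
        apply PySem.List.foldl_congr_mem
        intro acc i hi
        rw [List.getD_append _ _ _ _ (List.mem_range.mp hi)]
      simp only [List.foldl_cons, List.foldl_nil]
      rw [hcong, ih, List.getD_append_right _ _ _ _ le_rfl, Nat.sub_self, pvL_snoc]
      simp [List.getD]

-- A's big-endian loop computes pvL of the reverse
theorem pvAB (N : Nat) : ∀ (l : List Int),
    (List.range l.length).foldl
        (fun v i => PySem.Int.bor v (l.getD i 0 <<< (N * (l.length - 1 - i)))) 0 =
      pvL N l.reverse := by
  intro l
  induction l with
  | nil => simp [pvL]
  | cons w t ih =>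
      rw [List.length_cons, List.range_succ_eq_map, List.foldl_cons, List.foldl_map]
      have hcong : (List.range t.length).foldl
          (fun acc i => PySem.Int.bor acc
            ((w :: t).getD i.succ 0 <<< (N * (t.length + 1 - 1 - i.succ))))
            (PySem.Int.bor 0 ((w :: t).getD 0 0 <<< (N * (t.length + 1 - 1 - 0)))) =
          (List.range t.length).foldl
            (fun acc i => PySem.Int.bor acc (t.getD i 0 <<< (N * (t.length - 1 - i))))
            (PySem.Int.bor 0 (w <<< (N * t.length))) := by
        apply PySem.List.foldl_congr_mem
        intro acc i _
        rw [show (w :: t).getD i.succ 0 = t.getD i 0 from rfl,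
          show t.length + 1 - 1 - i.succ = t.length - 1 - i by omega]
      rw [hcong, pvFoldSeed, ih, pvBorZeroLeft, List.reverse_cons, pvL_snoc,
        List.length_reverse, PySem.Int.bor_comm]

-- shift-amount normalization: word_size * i as a Nat shift
theorem pvShiftNat (ws : Int) (hws : 0 ≤ ws) (i : Nat) :
    (ws * (i : Int)).toNat = ws.toNat * i := by
  have h : ws * (i : Int) = ((ws.toNat * i : Nat) : Int) := by
    push_cast [Int.toNat_of_nonneg hws]; ring
  rw [h]; omega

-- B's comb computes pvL (for nonnegative word_size)
theorem pvCombL (ws : Int) (hws : 0 ≤ ws) : ∀ (n : Nat) (l : List Int), l.length ≤ n →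
    pvComb ws l = pvL ws.toNat l := by
  intro n
  induction n with
  | zero =>
      intro l hl
      have : l = [] := List.eq_nil_of_length_eq_zero (by omega)
      subst this
      rw [pvComb]; simp [pvL]
  | succ n ih =>
      intro l hl
      rw [pvComb]
      by_cases h0 : l.length = 0
      · have : l = [] := List.eq_nil_of_length_eq_zero h0
        subst this; simp [pvL]
      by_cases h1 : l.length = 1
      · match l, h1 with
        | [w], _ =>
            simp only [if_neg h0, List.headD]
            simp [pvL, Int.zero_shiftLeft, PySem.Int.bor_zero]
      · simp only [if_neg h0, if_neg h1]
        have hk1 : 1 ≤ l.length / 2 := by omega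
        have hk2 : l.length / 2 < l.length := by omega
        rw [ih (l.take (l.length / 2)) (by simp [List.length_take]; omega),
          ih (l.drop (l.length / 2)) (by simp [List.length_drop]; omega)]
        have hlt : (l.take (l.length / 2)).length = l.length / 2 := by
          simp [List.length_take]; omega
        have key := pvL_append ws.toNat (l.take (l.length / 2)) (l.drop (l.length / 2))
        rw [List.take_append_drop] at key
        rw [key, hlt, pvShiftNat ws hws]

-- ===== VERDICT (by name: the statement is the Claim_ definition above) =====
theorem wordlist_to_int_v2_spec : Claim_equal_wordlist_to_int_v2 := by
  intro wordlist word_size endianess _ hpre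
  unfold Spec_wordlist_to_int_v2 wordlist_to_int_v2 wordlist_to_int_v2_alt
  rcases hpre with hws | hlen
  · by_cases he : endianess == "little"
    · simp only [he, if_pos]
      rw [pvCombL word_size hws wordlist.length wordlist le_rfl, ← pvAL word_size.toNat wordlist]
      apply PySem.List.foldl_congr_mem
      intro acc i _
      rw [pvShiftNat word_size hws i]
    · simp only [he, if_neg, Bool.false_eq_true, not_false_iff]
      rw [pvCombL word_size hws wordlist.reverse.length wordlist.reverse le_rfl,
        ← pvAB word_size.toNat wordlist]
      apply PySem.List.foldl_congr_mem
      intro acc i hi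
      have hi' : i < wordlist.length := List.mem_range.mp hi
      rw [show ((wordlist.length : Int) - (i : Int) - 1)
          = (((wordlist.length - 1 - i : Nat)) : Int) by omega,
        pvShiftNat word_size hws]
  · match wordlist, hlen with
    | [], _ => by_cases he : endianess == "little" <;> simp [he, pvComb]
    | [w], _ =>
        by_cases he : endianess == "little" <;>
          simp [he, pvComb, pvBorZeroLeft, Int.shiftLeft_zero]
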